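-- pv_equiv track=rewrite | github.com/Casper-Guo/aoc-language-exploration | 2015.py/Day11/day11.py | two_pairs
-- ===== SOURCE A (Python) =====
-- def two_pairs(input: str) -> bool:
--     i = 1
--     num_pairs = 0
--     while i < len(input):
--         if input[i] == input[i-1]:
--             num_pairs += 1
--             i += 2
--         else:
--             i += 1
--
--     return num_pairs >= 2
-- ===== SOURCE B (Python) =====
-- def two_pairs(input: str) -> bool:
--     total = 0
--     run = 0
--     prev = None
--     for c in input:
--         if c == prev:
--             run += 1
--         else:
--             total += run // 2
--             prev = c
--             run = 1
--     total += run // 2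
--     return total >= 2
-- ===== Notes on version B (the rewrite author's own statement) =====
-- stated objective: simpler
-- what changed: Replaces A's index-skipping greedy counter (compare s[i] with s[i-1], jump 2 on a match) with a single run-length scan that adds run_length//2 at each run boundary.
import Mathlib
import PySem

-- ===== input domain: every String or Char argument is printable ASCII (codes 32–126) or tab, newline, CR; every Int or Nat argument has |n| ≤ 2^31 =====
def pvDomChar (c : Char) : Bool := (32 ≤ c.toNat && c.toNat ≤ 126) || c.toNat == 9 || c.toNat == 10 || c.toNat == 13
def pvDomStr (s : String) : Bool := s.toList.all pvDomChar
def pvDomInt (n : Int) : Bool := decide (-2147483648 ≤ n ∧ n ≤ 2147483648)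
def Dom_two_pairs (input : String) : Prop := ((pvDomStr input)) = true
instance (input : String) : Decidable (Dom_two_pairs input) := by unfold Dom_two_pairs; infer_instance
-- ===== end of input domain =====

-- B replaces A's index-skipping greedy pair counter with a single run-length scan:
-- it folds over the characters tracking the current run, adding run//2 at each run boundary (objective: simpler decomposition).


-- ===== PORT A =====
-- while i < len(input): compare input[i] with input[i-1]; on a match count a pair and skip by 2, else step by 1
def twoPairsLoopA (cs : List Char) (i : Nat) (numPairs : Int) : Int :=
  if h : i < cs.length then
    if cs[i] = cs[i - 1]! then twoPairsLoopA cs (i + 2) (numPairs + 1)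
    else twoPairsLoopA cs (i + 1) numPairs
  else numPairs
termination_by cs.length - i

def two_pairs (input : String) : Bool :=
  decide (twoPairsLoopA input.toList 1 0 ≥ 2)

-- ===== PORT B =====
-- for c in input: extend the current run or close it, adding run // 2 to the total
def runStep (st : Int × Int × Option Char) (c : Char) : Int × Int × Option Char :=
  if some c = st.2.2 then (st.1, st.2.1 + 1, st.2.2)
  else (st.1 + PySem.Int.floordiv st.2.1 2, 1, some c)

def two_pairs_alt (input : String) : Bool :=
  let st := input.toList.foldl runStep (0, 0, none)
  decide (st.1 + PySem.Int.floordiv st.2.1 2 ≥ 2)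

-- ===== PRECONDITION & SPEC =====
def Spec_two_pairs (input : String) (out : Bool) : Prop := out = two_pairs_alt input
instance (input : String) (out : Bool) : Decidable (Spec_two_pairs input out) := by unfold Spec_two_pairs; infer_instance

-- ===== CLAIM (what is proved, stated in full; the proofs are below) =====
def Claim_equal_two_pairs : Prop := ∀ (input : String), Dom_two_pairs input → Spec_two_pairs input (two_pairs input)

-- ===== LEMMAS AND PROOFS =====

-- the common value: greedy adjacent-pair count of a character list
def gPairs : List Char → Nat
  | a :: b :: t => if a = b then 1 + gPairs t else gPairs (b :: t)
  | _ => 0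

theorem gPairs_replicate_append (p : Char) (rest : List Char)
    (hrest : rest = [] ∨ rest.head? ≠ some p) :
    ∀ n, gPairs (List.replicate n p ++ rest) = n / 2 + gPairs rest := by
  intro n
  induction n using Nat.strong_induction_on with
  | _ n ih =>
    match n with
    | 0 => simp
    | 1 =>
      cases rest with
      | nil => simp [gPairs]
      | cons b t =>
        simp only [List.head?_cons] at hrest
        simp [gPairs, List.replicate]
        intro h
        exact absurd h.symm (by simpa using hrest)
    | (m + 2) =>
      have : List.replicate (m + 2) p ++ rest
          = p :: p :: (List.replicate m p ++ rest) := by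
        simp [List.replicate_succ]
      rw [this]
      have h2 : gPairs (p :: p :: (List.replicate m p ++ rest)) = 1 + gPairs (List.replicate m p ++ rest) := by
        simp [gPairs]
      rw [h2, ih m (by omega)]
      omega

-- B-side invariant
theorem foldB_replicate (cs : List Char) :
    ∀ (p : Char) (n : Nat) (total : Int),
      (let st := cs.foldl runStep (total, (n : Int), some p)
       st.1 + PySem.Int.floordiv st.2.1 2)
      = total + (gPairs (List.replicate n p ++ cs) : Int) := by
  induction cs with
  | nil =>
    intro p n total
    have hg : gPairs (List.replicate n p) = n / 2 := by
      simpa using gPairs_replicate_append p [] (Or.inl rfl) n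
    simp [hg]
  | cons c t ih =>
    intro p n total
    by_cases hc : c = p
    · subst hc
      have hstep : runStep (total, (n : Int), some c) c = (total, ((n + 1 : Nat) : Int), some c) := by
        simp [runStep]
      have hrep : List.replicate n c ++ c :: t = List.replicate (n + 1) c ++ t := by
        simp [List.replicate_succ']
      simp only [List.foldl_cons, hstep, ih, hrep]
    · have hstep : runStep (total, (n : Int), some p) c
          = (total + PySem.Int.floordiv (n : Int) 2, ((1 : Nat) : Int), some c) := by
        simp [runStep, hc]
      simp only [List.foldl_cons, hstep, ih]
      have hg : gPairs (List.replicate n p ++ c :: t) = n / 2 + gPairs (c :: t) := by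
        exact gPairs_replicate_append p (c :: t) (Or.inr (by simp [hc])) n
      have hone : gPairs (List.replicate 1 c ++ t) = gPairs (c :: t) := by simp
      have hfd : PySem.Int.floordiv (n : Int) 2 = ((n / 2 : Nat) : Int) := by
        exact_mod_cast PySem.Int.floordiv_natCast n 2
      rw [hone, hg, hfd]
      push_cast; ring

theorem alt_eq_gPairs (input : String) :
    two_pairs_alt input = decide ((gPairs input.toList : Int) ≥ 2) := by
  unfold two_pairs_alt
  cases h : input.toList with
  | nil => simp [gPairs]
  | cons c t =>
    have hstep : runStep (0, 0, none) c = (0, ((1 : Nat) : Int), some c) := by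
      simp [runStep, PySem.Int.floordiv]
    simp only [List.foldl_cons, hstep, foldB_replicate t c 1 0]
    simp

-- A-side invariant: the loop from index i (i ≥ 1) computes the greedy count of the suffix from i-1
theorem loopA_eq_gPairs (cs : List Char) :
    ∀ (i : Nat) (np : Int), 1 ≤ i →
      twoPairsLoopA cs i np = np + (gPairs (cs.drop (i - 1)) : Int) := by
  intro i np hi
  induction i, np using twoPairsLoopA.induct cs with
  | case1 i np h heq ih =>
    have h1 : i - 1 < cs.length := by omega
    have hd1 : cs.drop (i - 1) = cs[i - 1] :: cs.drop i := by
      have hx := List.drop_eq_getElem_cons h1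
      rwa [Nat.sub_add_cancel hi] at hx
    have hd2 : cs.drop i = cs[i] :: cs.drop (i + 1) := List.drop_eq_getElem_cons h
    have hget : cs[i - 1]! = cs[i - 1] := getElem!_pos cs (i - 1) h1
    have hi2 : i + 2 - 1 = i + 1 := by omega
    rw [twoPairsLoopA, dif_pos h, if_pos heq, ih (by omega), hi2, hd1, hd2]
    have heq' : cs[i - 1] = cs[i] := by rw [← hget, heq]
    simp only [gPairs, if_pos heq']
    push_cast; ring
  | case2 i np h hne ih =>
    have h1 : i - 1 < cs.length := by omega
    have hd1 : cs.drop (i - 1) = cs[i - 1] :: cs.drop i := by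
      have hx := List.drop_eq_getElem_cons h1
      rwa [Nat.sub_add_cancel hi] at hx
    have hd2 : cs.drop i = cs[i] :: cs.drop (i + 1) := List.drop_eq_getElem_cons h
    have hget : cs[i - 1]! = cs[i - 1] := getElem!_pos cs (i - 1) h1
    have hi1 : i + 1 - 1 = i := by omega
    rw [twoPairsLoopA, dif_pos h, if_neg hne, ih (by omega), hi1, hd1, hd2]
    have hne' : ¬ (cs[i - 1] = cs[i]) := by
      rw [← hget]; exact fun he => hne he.symm
    simp only [gPairs, if_neg hne']
  | case3 i np h =>
    rw [twoPairsLoopA, dif_neg h]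
    have : cs.drop (i - 1) = [] ∨ (cs.drop (i - 1)).length ≤ 1 := by
      right
      simp only [List.length_drop]
      omega
    rcases this with h' | h'
    · simp [h', gPairs]
    · match hm : cs.drop (i - 1) with
      | [] => simp [gPairs]
      | [a] => simp [gPairs]
      | a :: b :: t => rw [hm] at h'; simp at h'

-- ===== VERDICT (by name: the statement is the Claim_ definition above) =====
theorem two_pairs_spec : Claim_equal_two_pairs := by
  intro input _
  unfold Spec_two_pairs
  rw [alt_eq_gPairs]
  unfold two_pairs
  rw [loopA_eq_gPairs input.toList 1 0 le_rfl]
  simp
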